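-- pv_equiv track=rewrite | github.com/ZombieSocrates/eight-queens | chess_board.py | get_diagonals
-- ===== SOURCE A (Python) =====
-- def move_up_and_left(coord):
--     new_coord = coord[0] - 1, coord[1] - 1
--     if (new_coord[0] >= 0) and (new_coord[1] >= 0):
--         return new_coord
--     return None
--
-- def move_up_and_right(coord):
--     '''get rid of hard-coded n-queens minus 1
--     '''
--     new_coord = coord[0] - 1, coord[1] + 1
--     if (new_coord[0] >= 0) and (new_coord[1] <= 7):
--         return new_coord
--     return None
--
-- def move_down_and_right(coord):
--     '''get rid of hard-coded n-queens minus 1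
--     '''
--     new_coord = coord[0] + 1, coord[1] + 1
--     if (new_coord[0] <= 7) and (new_coord[1] <= 7):
--         return new_coord
--     return None
--
-- def move_down_and_left(coord):
--     '''get rid of hard-coded n-queens minus 1
--     '''
--     new_coord = coord[0] + 1, coord[1] - 1
--     if (new_coord[0] <= 7) and (new_coord[1] >= 0):
--         return new_coord
--     return None
--
-- def get_diagonals(q_position):
--     '''This is probably going to be ugly
--     '''
--     diags = []
--     diag_checker = {"up_left":move_up_and_left,
--         "up_right":move_up_and_right,
--         "down_right":move_down_and_right,
--         "down_left":move_down_and_left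
--         }
--     for d in diag_checker.keys():
--         new_pos = diag_checker[d](q_position)
--         if new_pos is None:
--             continue
--         else:
--             while new_pos is not None:
--                 diags.append(new_pos)
--                 new_pos = diag_checker[d](new_pos)
--     return diags
-- ===== SOURCE B (Python) =====
-- def get_diagonals(q_position):
--     r, c = q_position[0], q_position[1]
--     d, s = r - c, r + c
--     # the two diagonal LINES through (r, c): i - (i - d) = d (main), i + (s - i) = s (anti);
--     # each line is clipped on the one side its direction's helper checks, then sliced around row r
--     up_left = [(i, i - d) for i in range(max(0, d), r)][::-1]
--     up_right = [(i, s - i) for i in range(max(0, s - 7), r)][::-1]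
--     down_right = [(i, i - d) for i in range(r + 1, min(7, 7 + d) + 1)]
--     down_left = [(i, s - i) for i in range(r + 1, min(7, s) + 1)]
--     return up_left + up_right + down_right + down_left
-- ===== Notes on version B (the rewrite author's own statement) =====
-- stated objective: alternative
-- what changed: Instead of stepping outward from the queen with four move-helpers and per-step edge checks, B parameterises the two diagonal lines through the queen by the row index alone, clips each line at the single edge the corresponding helper checks, generates the row ranges in ascending order and reverses the two upward segments.
import Mathlib
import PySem

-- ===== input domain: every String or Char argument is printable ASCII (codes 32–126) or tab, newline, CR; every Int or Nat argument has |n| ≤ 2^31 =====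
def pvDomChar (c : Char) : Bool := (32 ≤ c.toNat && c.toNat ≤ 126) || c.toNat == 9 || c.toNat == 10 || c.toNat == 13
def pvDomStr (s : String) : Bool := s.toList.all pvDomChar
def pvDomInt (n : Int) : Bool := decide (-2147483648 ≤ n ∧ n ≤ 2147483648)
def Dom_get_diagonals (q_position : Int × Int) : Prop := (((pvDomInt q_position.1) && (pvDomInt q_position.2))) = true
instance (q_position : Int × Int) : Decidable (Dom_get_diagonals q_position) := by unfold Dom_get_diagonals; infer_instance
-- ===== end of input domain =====

-- B replaces the four move-helpers stepping outward with row-indexed comprehensions over the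
-- two diagonal lines through the queen, clipped at one edge each, reversing the upward parts
-- (objective: alternative decomposition of the same cost).

-- ===== PORT A =====
def move_up_and_left (coord : Int × Int) : Option (Int × Int) :=
  let nc := (coord.1 - 1, coord.2 - 1)
  if nc.1 ≥ 0 ∧ nc.2 ≥ 0 then some nc else none

def move_up_and_right (coord : Int × Int) : Option (Int × Int) :=
  let nc := (coord.1 - 1, coord.2 + 1)
  if nc.1 ≥ 0 ∧ nc.2 ≤ 7 then some nc else none

def move_down_and_right (coord : Int × Int) : Option (Int × Int) :=
  let nc := (coord.1 + 1, coord.2 + 1)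
  if nc.1 ≤ 7 ∧ nc.2 ≤ 7 then some nc else none

def move_down_and_left (coord : Int × Int) : Option (Int × Int) :=
  let nc := (coord.1 + 1, coord.2 - 1)
  if nc.1 ≤ 7 ∧ nc.2 ≥ 0 then some nc else none

-- the 'while new_pos is not None' loop of A, one copy per direction (the dict iteration order)
def loopUL (p : Int × Int) : List (Int × Int) :=
  match h : move_up_and_left p with
  | none => []
  | some q => q :: loopUL q
termination_by (min p.1 p.2).toNat
decreasing_by simp [move_up_and_left] at h; obtain ⟨⟨h1, h2⟩, h3⟩ := h; subst h3; simp; omega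

def loopUR (p : Int × Int) : List (Int × Int) :=
  match h : move_up_and_right p with
  | none => []
  | some q => q :: loopUR q
termination_by (min p.1 (7 - p.2)).toNat
decreasing_by simp [move_up_and_right] at h; obtain ⟨⟨h1, h2⟩, h3⟩ := h; subst h3; simp; omega

def loopDR (p : Int × Int) : List (Int × Int) :=
  match h : move_down_and_right p with
  | none => []
  | some q => q :: loopDR q
termination_by (min (7 - p.1) (7 - p.2)).toNat
decreasing_by simp [move_down_and_right] at h; obtain ⟨⟨h1, h2⟩, h3⟩ := h; subst h3; simp; omega

def loopDL (p : Int × Int) : List (Int × Int) :=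
  match h : move_down_and_left p with
  | none => []
  | some q => q :: loopDL q
termination_by (min (7 - p.1) p.2).toNat
decreasing_by simp [move_down_and_left] at h; obtain ⟨⟨h1, h2⟩, h3⟩ := h; subst h3; simp; omega

def get_diagonals (q_position : Int × Int) : List (Int × Int) :=
  loopUL q_position ++ loopUR q_position ++ loopDR q_position ++ loopDL q_position

-- ===== PORT B =====
-- [::-1] on a list is List.reverse (PySem.List.slice?_none_none_neg_one)
def get_diagonals_alt (q_position : Int × Int) : List (Int × Int) :=
  let r := q_position.1
  let c := q_position.2
  let d := r - c
  let s := r + c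
  let up_left := ((PySem.List.pyRange (max 0 d) r 1).map (fun i => (i, i - d))).reverse
  let up_right := ((PySem.List.pyRange (max 0 (s - 7)) r 1).map (fun i => (i, s - i))).reverse
  let down_right := (PySem.List.pyRange (r + 1) (min 7 (7 + d) + 1) 1).map (fun i => (i, i - d))
  let down_left := (PySem.List.pyRange (r + 1) (min 7 s + 1) 1).map (fun i => (i, s - i))
  up_left ++ up_right ++ down_right ++ down_left

-- ===== PRECONDITION & SPEC =====
def Spec_get_diagonals (q_position : Int × Int) (out : List (Int × Int)) : Prop := out = get_diagonals_alt q_position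
instance (q_position : Int × Int) (out : List (Int × Int)) : Decidable (Spec_get_diagonals q_position out) := by unfold Spec_get_diagonals; infer_instance

-- ===== CLAIM =====
def Claim_equal_get_diagonals : Prop := ∀ (q_position : Int × Int), Dom_get_diagonals q_position → Spec_get_diagonals q_position (get_diagonals q_position)

-- ===== LEMMAS AND PROOFS =====

-- A's per-direction while loop, in "pyRange of step counts" form
def ray (r c dr dc len : Int) : List (Int × Int) :=
  (PySem.List.pyRange 1 (len + 1) 1).map (fun k => (r + dr * k, c + dc * k))

theorem ray_nil (r c dr dc L : Int) (h : L ≤ 0) : ray r c dr dc L = [] := by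
  unfold ray
  rw [PySem.List.pyRange_one_eq_nil (by omega)]
  simp

theorem ray_shift (r c dr dc L : Int) (h : 1 ≤ L) :
    ray r c dr dc L = (r + dr, c + dc) :: ray (r + dr) (c + dc) dr dc (L - 1) := by
  unfold ray
  rw [PySem.List.pyRange_one_cons (by omega)]
  simp only [List.map_cons, mul_one]
  congr 1
  rw [PySem.List.pyRange_one, PySem.List.pyRange_one, List.map_map, List.map_map]
  have hlen : (L + 1 - (1 + 1)).toNat = (L - 1 + 1 - 1).toNat := by omega
  rw [hlen]
  apply List.map_congr_left
  intro k _
  simp only [Function.comp_apply, Prod.mk.injEq]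
  constructor <;> ring

theorem loopUL_eq (p : Int × Int) : loopUL p = ray p.1 p.2 (-1) (-1) (min p.1 p.2) := by
  fun_induction loopUL p with
  | case1 p h =>
    simp [move_up_and_left] at h
    rw [ray_nil _ _ _ _ _ (by omega)]
  | case2 p q h ih =>
    simp [move_up_and_left] at h
    obtain ⟨⟨h1, h2⟩, h3⟩ := h
    rw [ray_shift _ _ _ _ _ (by omega)]
    subst h3
    have hm : min p.1 p.2 - 1 = min (p.1 - 1) (p.2 - 1) := by omega
    rw [hm]
    have e1 : p.1 + -1 = p.1 - 1 := by ring
    have e2 : p.2 + -1 = p.2 - 1 := by ring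
    rw [e1, e2]
    exact congrArg _ ih

theorem loopUR_eq (p : Int × Int) : loopUR p = ray p.1 p.2 (-1) 1 (min p.1 (7 - p.2)) := by
  fun_induction loopUR p with
  | case1 p h =>
    simp [move_up_and_right] at h
    rw [ray_nil _ _ _ _ _ (by omega)]
  | case2 p q h ih =>
    simp [move_up_and_right] at h
    obtain ⟨⟨h1, h2⟩, h3⟩ := h
    rw [ray_shift _ _ _ _ _ (by omega)]
    subst h3
    have hm : min p.1 (7 - p.2) - 1 = min (p.1 - 1) (7 - (p.2 + 1)) := by omega
    rw [hm]
    have e1 : p.1 + -1 = p.1 - 1 := by ring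
    rw [e1]
    exact congrArg _ ih

theorem loopDR_eq (p : Int × Int) : loopDR p = ray p.1 p.2 1 1 (min (7 - p.1) (7 - p.2)) := by
  fun_induction loopDR p with
  | case1 p h =>
    simp [move_down_and_right] at h
    rw [ray_nil _ _ _ _ _ (by omega)]
  | case2 p q h ih =>
    simp [move_down_and_right] at h
    obtain ⟨⟨h1, h2⟩, h3⟩ := h
    rw [ray_shift _ _ _ _ _ (by omega)]
    subst h3
    have hm : min (7 - p.1) (7 - p.2) - 1 = min (7 - (p.1 + 1)) (7 - (p.2 + 1)) := by omega
    rw [hm]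
    exact congrArg _ ih

theorem loopDL_eq (p : Int × Int) : loopDL p = ray p.1 p.2 1 (-1) (min (7 - p.1) p.2) := by
  fun_induction loopDL p with
  | case1 p h =>
    simp [move_down_and_left] at h
    rw [ray_nil _ _ _ _ _ (by omega)]
  | case2 p q h ih =>
    simp [move_down_and_left] at h
    obtain ⟨⟨h1, h2⟩, h3⟩ := h
    rw [ray_shift _ _ _ _ _ (by omega)]
    subst h3
    have hm : min (7 - p.1) p.2 - 1 = min (7 - (p.1 + 1)) (p.2 - 1) := by omega
    rw [hm]
    have e2 : p.2 + -1 = p.2 - 1 := by ring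
    rw [e2]
    exact congrArg _ ih

-- [a, a+1, …, b-1] reversed is [b-1, …, a], i.e. b - k for k = 1 … b - a
theorem pyRange_reverse (a b : Int) :
    (PySem.List.pyRange a b 1).reverse =
      (PySem.List.pyRange 1 (b - a + 1) 1).map (fun k => b - k) := by
  rw [PySem.List.pyRange_one, PySem.List.pyRange_one, List.map_map]
  apply List.ext_getElem
  · simp
  · intro i h1 h2
    simp only [List.length_reverse, List.length_map, List.length_range] at h1 h2
    simp only [List.getElem_reverse, List.length_map, List.length_range, List.getElem_map,
      List.getElem_range, Function.comp_apply]
    omega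

-- [r+1, …, r+L] is r + k for k = 1 … L
theorem pyRange_succ_shift (r b : Int) :
    PySem.List.pyRange (r + 1) b 1 =
      (PySem.List.pyRange 1 (b - r) 1).map (fun k => r + k) := by
  rw [PySem.List.pyRange_one, PySem.List.pyRange_one, List.map_map]
  have hlen : (b - (r + 1)).toNat = (b - r - 1).toNat := by omega
  rw [hlen]
  apply List.map_congr_left
  intro k _
  simp only [Function.comp_apply]
  omega

-- the reversed upward comprehension is exactly A's upward ray
theorem up_seg_eq (r a L : Int) (ha : r - a = L) (f g : Int → Int × Int)
    (hfg : ∀ k, 1 ≤ k → k ≤ L → f (r - k) = g k) :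
    ((PySem.List.pyRange a r 1).map f).reverse =
      (PySem.List.pyRange 1 (L + 1) 1).map g := by
  rw [← List.map_reverse, pyRange_reverse, List.map_map]
  have : r - a + 1 = L + 1 := by omega
  rw [this]
  apply List.map_congr_left
  intro k hk
  rw [PySem.List.mem_pyRange_one] at hk
  exact hfg k hk.1 (by omega)

-- the downward comprehension is exactly A's downward ray
theorem down_seg_eq (r b L : Int) (hb : b - r - 1 = L) (f g : Int → Int × Int)
    (hfg : ∀ k, 1 ≤ k → k ≤ L → f (r + k) = g k) :
    (PySem.List.pyRange (r + 1) b 1).map f =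
      (PySem.List.pyRange 1 (L + 1) 1).map g := by
  rw [pyRange_succ_shift, List.map_map]
  have : b - r = L + 1 := by omega
  rw [this]
  apply List.map_congr_left
  intro k hk
  rw [PySem.List.mem_pyRange_one] at hk
  exact hfg k hk.1 (by omega)

-- ===== VERDICT =====
theorem get_diagonals_spec : Claim_equal_get_diagonals := by
  intro p _
  unfold Spec_get_diagonals get_diagonals get_diagonals_alt
  rw [loopUL_eq, loopUR_eq, loopDR_eq, loopDL_eq]
  simp only []
  congr 1
  · congr 1
    · congr 1
      · exact (up_seg_eq p.1 (max 0 (p.1 - p.2)) (min p.1 p.2) (by omega) _ _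
          (fun k _ _ => by simp only [Prod.mk.injEq]; constructor <;> ring)).symm
      · exact (up_seg_eq p.1 (max 0 (p.1 + p.2 - 7)) (min p.1 (7 - p.2)) (by omega) _ _
          (fun k _ _ => by simp only [Prod.mk.injEq]; constructor <;> ring)).symm
    · exact (down_seg_eq p.1 (min 7 (7 + (p.1 - p.2)) + 1) (min (7 - p.1) (7 - p.2)) (by omega) _ _
        (fun k _ _ => by simp only [Prod.mk.injEq]; constructor <;> ring)).symm
  · exact (down_seg_eq p.1 (min 7 (p.1 + p.2) + 1) (min (7 - p.1) p.2) (by omega) _ _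
      (fun k _ _ => by simp only [Prod.mk.injEq]; constructor <;> ring)).symm
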